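-- pv_equiv track=rewrite | github.com/zirui-yuan/CoLLMLight | utils/utils.py | redistribute_vehicles
-- ===== SOURCE A (Python) =====
-- def redistribute_vehicles(vehicle_counts, full_num):
--     n = len(vehicle_counts)
--     for i in range(n):
--         if vehicle_counts[i] > full_num:
--             overflow = vehicle_counts[i] - full_num
--             vehicle_counts[i] = full_num
--             if i + 1 < n:
--                 vehicle_counts[i + 1] += overflow
--
--     return vehicle_counts
-- ===== SOURCE B (Python) =====
-- def redistribute_vehicles(vehicle_counts, full_num):
--     # Closed form: with Q[i] = sum(vehicle_counts[:i]) - i*full_num, the carry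
--     # entering cell i is carry[i] = Q[i] - min(Q[0..i]) (running minimum), and
--     # each output cell is x_i + carry[i] - carry[i+1].
--     Q = [0]
--     for x in vehicle_counts:
--         Q.append(Q[-1] + x - full_num)
--     car = []
--     m = 0
--     for q in Q:
--         m = min(m, q)
--         car.append(q - m)
--     for i in range(len(vehicle_counts)):
--         vehicle_counts[i] += car[i] - car[i + 1]
--     return vehicle_counts
-- ===== Notes on version B (the rewrite author's own statement) =====
-- stated objective: alternative
-- what changed: B computes the result in closed form via three staged passes - prefix sums Q[i] = sum(counts[:i]) - i*full_num, a running minimum giving each cell's incoming carry as Q[i] - min(Q[0..i]), and a reconstruction pass x_i + carry[i] - carry[i+1] - instead of A's single pass that pushes each cell's overflow into the next list slot.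
import Mathlib
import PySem

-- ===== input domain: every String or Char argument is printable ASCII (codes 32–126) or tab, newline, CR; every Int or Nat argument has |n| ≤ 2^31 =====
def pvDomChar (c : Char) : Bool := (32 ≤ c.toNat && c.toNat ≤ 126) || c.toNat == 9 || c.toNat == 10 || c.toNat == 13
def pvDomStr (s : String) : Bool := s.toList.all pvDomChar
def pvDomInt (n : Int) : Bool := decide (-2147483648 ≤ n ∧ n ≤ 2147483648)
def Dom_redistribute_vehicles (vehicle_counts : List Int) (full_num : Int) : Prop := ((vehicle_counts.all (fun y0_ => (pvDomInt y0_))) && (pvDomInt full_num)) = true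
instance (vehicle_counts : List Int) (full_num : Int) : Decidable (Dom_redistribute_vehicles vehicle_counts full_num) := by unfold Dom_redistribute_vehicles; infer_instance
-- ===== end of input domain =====

-- B replaces A's overflow-pushing pass by a closed form in three staged passes (prefix
-- sums, running-minimum carries, reconstruction); objective: alternative. Both Pythons
-- mutate the input list in place and return it; the equivalence proved is about the
-- return value.

-- ===== PORT A =====
-- one iteration of A's loop body at index i on the current list state
def pvStepA (full_num : Int) (n : Nat) (l : List Int) (i : Nat) : List Int :=
  if l.getD i 0 > full_num then
    let overflow := l.getD i 0 - full_num
    let l' := l.set i full_num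
    if i + 1 < n then l'.set (i + 1) (l'.getD (i + 1) 0 + overflow) else l'
  else l

def redistribute_vehicles (vehicle_counts : List Int) (full_num : Int) : List Int :=
  let n := vehicle_counts.length
  (List.range n).foldl (pvStepA full_num n) vehicle_counts

-- ===== PORT B =====
-- first pass of Source B: Q[i] = sum of counts[:i] minus i*full_num (q is Q[-1])
def pvQ (full q : Int) : List Int → List Int
  | [] => [q]
  | x :: xs => q :: pvQ full (q + x - full) xs

-- second pass of Source B: carry[i] = Q[i] - running minimum of Q[0..i]
def pvCar (m : Int) : List Int → List Int
  | [] => []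
  | q :: qs => (q - min m q) :: pvCar (min m q) qs

-- third pass of Source B: each cell becomes x_i + carry[i] - carry[i+1]
def pvCombine : List Int → List Int → List Int
  | x :: xs, c :: c' :: cs => (x + c - c') :: pvCombine xs (c' :: cs)
  | _, _ => []

def redistribute_vehicles_alt (vehicle_counts : List Int) (full_num : Int) : List Int :=
  pvCombine vehicle_counts (pvCar 0 (pvQ full_num 0 vehicle_counts))

-- ===== PRECONDITION & SPEC =====
def Spec_redistribute_vehicles (vehicle_counts : List Int) (full_num : Int) (out : List Int) : Prop := out = redistribute_vehicles_alt vehicle_counts full_num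
instance (vehicle_counts : List Int) (full_num : Int) (out : List Int) : Decidable (Spec_redistribute_vehicles vehicle_counts full_num out) := by unfold Spec_redistribute_vehicles; infer_instance

-- ===== CLAIM =====
def Claim_equal_redistribute_vehicles : Prop := ∀ (vehicle_counts : List Int) (full_num : Int), Dom_redistribute_vehicles vehicle_counts full_num → Spec_redistribute_vehicles vehicle_counts full_num (redistribute_vehicles vehicle_counts full_num)

-- ===== LEMMAS AND PROOFS =====

-- proof-only intermediate: the carry recursion both programs realise
def pvCarry (full_num carry : Int) : List Int → List Int
  | [] => []
  | x :: xs =>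
    let v := x + carry
    if v > full_num then full_num :: pvCarry full_num (v - full_num) xs
    else v :: pvCarry full_num 0 xs

theorem pv_set_append (pre : List Int) (x : Int) (xs : List Int) (v : Int) :
    (pre ++ x :: xs).set pre.length v = pre ++ v :: xs := by
  induction pre with
  | nil => rfl
  | cons a t ih => simp [ih]

theorem pvCarry_shift (full_num c x : Int) (xs : List Int) :
    pvCarry full_num c (x :: xs) = pvCarry full_num 0 ((x + c) :: xs) := by
  simp [pvCarry]

theorem pv_key1 (full_num : Int) (xs : List Int) : ∀ (x : Int) (pre : List Int),
    (List.range' pre.length (xs.length + 1)).foldl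
        (pvStepA full_num (pre.length + (xs.length + 1))) (pre ++ x :: xs)
      = pre ++ pvCarry full_num 0 (x :: xs) := by
  induction xs with
  | nil =>
    intro x pre
    simp only [List.length_nil, List.range'_succ, List.range'_zero, List.foldl_cons,
      List.foldl_nil]
    by_cases hx : x > full_num
    · have h1 : (pre ++ x :: []).set pre.length full_num = pre ++ full_num :: [] :=
        pv_set_append pre x [] full_num
      simp [pvStepA, hx, h1, pvCarry]
    · simp [pvStepA, hx, pvCarry]
  | cons y ys ih =>
    intro x pre
    rw [List.range'_succ, List.foldl_cons]
    by_cases hx : x > full_num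
    · have hstep1 : (pre ++ x :: y :: ys).set pre.length full_num = pre ++ full_num :: y :: ys :=
        pv_set_append pre x (y :: ys) full_num
      have hsz : pvStepA full_num (pre.length + ((y :: ys).length + 1)) (pre ++ x :: y :: ys)
          pre.length = (pre ++ [full_num]) ++ (y + (x - full_num)) :: ys := by
        simp only [List.length_cons]
        simp [pvStepA, hx, hstep1]
      rw [hsz]
      have ih' := ih (y + (x - full_num)) (pre ++ [full_num])
      simp only [List.length_append, List.length_cons, List.length_nil] at ih' ⊢
      rw [show pre.length + (ys.length + 1 + 1) = pre.length + 0 + 1 + (ys.length + 1) by omega]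
      rw [show pre.length + 1 = pre.length + 0 + 1 by omega]
      rw [ih']
      rw [show (pvCarry full_num 0 (x :: y :: ys)) =
          full_num :: pvCarry full_num 0 ((y + (x - full_num)) :: ys) by
        rw [show pvCarry full_num 0 (x :: y :: ys) =
            full_num :: pvCarry full_num (x + 0 - full_num) (y :: ys) by simp [pvCarry, hx]]
        rw [pvCarry_shift]
        ring_nf]
      simp
    · have hstep : pvStepA full_num (pre.length + ((y :: ys).length + 1)) (pre ++ x :: y :: ys)
          pre.length = (pre ++ [x]) ++ y :: ys := by
        simp [pvStepA, hx]
      rw [hstep]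
      have ih' := ih y (pre ++ [x])
      simp only [List.length_append, List.length_cons, List.length_nil] at ih' ⊢
      rw [show pre.length + (ys.length + 1 + 1) = pre.length + 0 + 1 + (ys.length + 1) by omega]
      rw [show pre.length + 1 = pre.length + 0 + 1 by omega]
      rw [ih']
      simp [pvCarry, hx]

theorem pv_key (full_num : Int) (rest : List Int) :
    (List.range' 0 rest.length).foldl (pvStepA full_num rest.length) rest
      = pvCarry full_num 0 rest := by
  cases rest with
  | nil => simp [pvCarry]
  | cons x xs =>
    have h := pv_key1 full_num xs x []
    simpa using h

-- the closed form realises the carry recursion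
theorem pv_closed (full : Int) : ∀ (l : List Int) (q m carry : Int), m ≤ q → carry = q - m →
    pvCombine l (pvCar m (pvQ full q l)) = pvCarry full carry l := by
  intro l
  induction l with
  | nil => intro q m carry _ _; simp [pvCombine, pvCarry]
  | cons x xs ih =>
    intro q m carry hm hc
    have hmin : min m q = m := min_eq_left hm
    cases xs with
    | nil =>
      simp only [pvQ, pvCar, pvCombine, hmin, pvCarry]
      split_ifs with h <;> (apply List.ext_getElem <;> simp <;> omega)
    | cons y ys =>
      have hmm : min (min m (q + x - full)) (q + x - full) = min m (q + x - full) := by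
        rw [min_assoc, min_self]
      have hstep : pvCombine (x :: y :: ys) (pvCar m (pvQ full q (x :: y :: ys)))
          = (x + carry - ((q + x - full) - min m (q + x - full)))
            :: pvCombine (y :: ys) (pvCar (min m (q + x - full)) (pvQ full (q + x - full) (y :: ys))) := by
        simp only [pvQ, pvCar, pvCombine, hmin, hc, hmm]
      rw [hstep]
      have htail : pvCombine (y :: ys)
            (pvCar (min m (q + x - full)) (pvQ full (q + x - full) (y :: ys)))
          = pvCarry full ((q + x - full) - min m (q + x - full)) (y :: ys) :=
        ih (q + x - full) (min m (q + x - full)) _ (min_le_right _ _) rfl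
      rw [htail]
      rw [show pvCarry full carry (x :: y :: ys)
          = if x + carry > full then full :: pvCarry full (x + carry - full) (y :: ys)
            else (x + carry) :: pvCarry full 0 (y :: ys) from rfl]
      split_ifs with h
      · have h1 : (q + x - full) - min m (q + x - full) = x + carry - full := by omega
        rw [h1]
        congr 1
        omega
      · have h1 : (q + x - full) - min m (q + x - full) = 0 := by omega
        rw [h1]
        congr 1
        omega

-- ===== VERDICT =====
theorem redistribute_vehicles_spec : Claim_equal_redistribute_vehicles := by
  intro l f _
  show redistribute_vehicles l f = redistribute_vehicles_alt l f
  have h := pv_key f l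
  have h2 := pv_closed f l 0 0 0 le_rfl (by ring)
  simp only [redistribute_vehicles, redistribute_vehicles_alt, List.range_eq_range']
  rw [h, h2]
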